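-- pv_equiv track=rewrite | github.com/dla0510/Algorithm | 09-14/1-3) Minimize the Difference Between Target and Chosen Elements.py | minimizeTheDifference
-- ===== SOURCE A (Python) =====
-- from itertools import product
--
-- def minimizeTheDifference(mat, target):
--     min_dif=100000000
--     for prod in product(*mat):#행마다 하나씩 고른 모든 조합을 담은 배열
--         s=sum(prod)
--         dif = abs(s-target)
--         if dif<min_dif:
--             min_dif=dif
--             if dif==0:
--                 return 0
--     return min_dif
-- ===== SOURCE B (Python) =====
-- def minimizeTheDifference(mat, target):
--     # DP over the set of distinct reachable sums (one element per row), then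
--     # take the best absolute difference, bounded by the same initial bound A uses.
--     sums = {0}
--     for row in mat:
--         sums = {s + x for s in sums for x in row}
--     best = 100000000
--     for s in sums:
--         best = min(best, abs(s - target))
--     return best
-- ===== Notes on version B (the rewrite author's own statement) =====
-- stated objective: alternative
-- what changed: Replaces exhaustive enumeration of all row combinations (itertools.product with per-tuple summing and an early-exit min loop) with a dynamic program that carries the set of distinct reachable sums row by row and then minimizes the absolute difference over that set.
import Mathlib
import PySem

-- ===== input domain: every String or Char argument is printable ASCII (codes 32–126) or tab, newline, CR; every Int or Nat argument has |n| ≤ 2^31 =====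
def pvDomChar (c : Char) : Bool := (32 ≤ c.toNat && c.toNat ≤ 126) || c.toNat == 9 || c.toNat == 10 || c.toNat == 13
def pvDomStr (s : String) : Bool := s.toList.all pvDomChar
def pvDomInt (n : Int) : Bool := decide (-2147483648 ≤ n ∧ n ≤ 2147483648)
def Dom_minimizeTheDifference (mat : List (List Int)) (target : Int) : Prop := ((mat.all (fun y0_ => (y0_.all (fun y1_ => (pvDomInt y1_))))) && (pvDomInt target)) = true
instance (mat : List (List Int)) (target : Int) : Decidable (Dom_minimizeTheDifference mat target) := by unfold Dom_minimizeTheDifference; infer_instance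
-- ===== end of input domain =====

-- B replaces A's exhaustive enumeration of every row combination with a DP over the
-- set of distinct reachable sums (objective: alternative algorithm).

-- ===== PORT A =====
-- itertools.product(*mat): all choices of one element per row, last row varying fastest
def pvProds : List (List Int) → List (List Int)
  | [] => [[]]
  | row :: rows => row.flatMap (fun x => (pvProds rows).map (fun p => x :: p))

-- the for-loop of A, with the early 'return 0'
def pvLoopA (target : Int) : List (List Int) → Int → Int
  | [], min_dif => min_dif
  | p :: ps, min_dif =>
    let s := p.foldl (· + ·) 0          -- sum(prod)
    let dif := |s - target|
    if dif < min_dif then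
      (if dif = 0 then 0 else pvLoopA target ps dif)
    else pvLoopA target ps min_dif

def minimizeTheDifference (mat : List (List Int)) (target : Int) : Int :=
  pvLoopA target (pvProds mat) 100000000

-- ===== PORT B =====
def minimizeTheDifference_alt (mat : List (List Int)) (target : Int) : Int :=
  let sums := mat.foldl
    (fun sums row => PySem.Set.ofList (sums.flatMap (fun s => row.map (fun x => s + x))))
    (PySem.Set.ofList [(0 : Int)])
  sums.foldl (fun best s => min best |s - target|) 100000000

-- ===== PRECONDITION & SPEC =====
def Spec_minimizeTheDifference (mat : List (List Int)) (target : Int) (out : Int) : Prop := out = minimizeTheDifference_alt mat target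
instance (mat : List (List Int)) (target : Int) (out : Int) : Decidable (Spec_minimizeTheDifference mat target out) := by unfold Spec_minimizeTheDifference; infer_instance

-- ===== CLAIM (what is proved, stated in full; the proofs are below) =====
def Claim_equal_minimizeTheDifference : Prop := ∀ (mat : List (List Int)) (target : Int), Dom_minimizeTheDifference mat target → Spec_minimizeTheDifference mat target (minimizeTheDifference mat target)

-- ===== LEMMAS AND PROOFS =====

-- the common shape: fold 'min with |s - target|' over a list of sums
def pvMinF (target c : Int) (l : List Int) : Int :=
  l.foldl (fun b s => min b |s - target|) c

lemma pvMinF_zero (target : Int) (l : List Int) : pvMinF target 0 l = 0 := by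
  induction l with
  | nil => rfl
  | cons x xs ih =>
      simpa [pvMinF, min_eq_left (abs_nonneg (x - target))] using ih

lemma pvLoopA_eq_minF (target : Int) (ps : List (List Int)) (m : Int) :
    pvLoopA target ps m = pvMinF target m (ps.map (fun p => p.foldl (· + ·) 0)) := by
  induction ps generalizing m with
  | nil => rfl
  | cons p ps ih =>
      simp only [pvLoopA, pvMinF, List.map_cons, List.foldl_cons]
      by_cases h : |p.foldl (· + ·) 0 - target| < m
      · by_cases h0 : |p.foldl (· + ·) 0 - target| = 0
        · rw [if_pos h, if_pos h0]
          have : min m |p.foldl (· + ·) 0 - target| = 0 := by omega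
          rw [this]
          exact (pvMinF_zero target _).symm
        · simp only [h, h0, if_true, if_false]
          rw [ih, min_eq_right (le_of_lt h)]
          rfl
      · simp only [h, if_false]
        rw [ih, min_eq_left (le_of_not_gt h)]
        rfl

lemma pvMinF_le_init (target c : Int) (l : List Int) : pvMinF target c l ≤ c := by
  induction l generalizing c with
  | nil => exact le_refl c
  | cons x xs ih =>
      calc pvMinF target c (x :: xs) = pvMinF target (min c |x - target|) xs := rfl
      _ ≤ min c |x - target| := ih _
      _ ≤ c := min_le_left _ _

lemma pvMinF_le_mem (target c : Int) (l : List Int) (x : Int) (hx : x ∈ l) :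
    pvMinF target c l ≤ |x - target| := by
  induction l generalizing c with
  | nil => cases hx
  | cons y ys ih =>
      rcases List.mem_cons.mp hx with h | h
      · subst h
        calc pvMinF target c (x :: ys) = pvMinF target (min c |x - target|) ys := rfl
        _ ≤ min c |x - target| := pvMinF_le_init _ _ _
        _ ≤ |x - target| := min_le_right _ _
      · exact ih _ h

lemma pvMinF_cases (target c : Int) (l : List Int) :
    pvMinF target c l = c ∨ ∃ x ∈ l, pvMinF target c l = |x - target| := by
  induction l generalizing c with
  | nil => exact Or.inl rfl
  | cons y ys ih =>
      have hstep : pvMinF target c (y :: ys) = pvMinF target (min c |y - target|) ys := rfl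
      rcases ih (min c |y - target|) with h | ⟨x, hx, h⟩
      · rcases le_or_gt c |y - target| with hcy | hcy
        · left; rw [hstep, h]; omega
        · right; exact ⟨y, List.mem_cons_self, by rw [hstep, h]; omega⟩
      · right; exact ⟨x, List.mem_cons_of_mem _ hx, by rw [hstep, h]⟩

lemma pvMinF_congr_mem (target c : Int) (l₁ l₂ : List Int)
    (h : ∀ x, x ∈ l₁ ↔ x ∈ l₂) : pvMinF target c l₁ = pvMinF target c l₂ := by
  apply le_antisymm
  · rcases pvMinF_cases target c l₂ with h2 | ⟨x, hx, h2⟩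
    · rw [h2]; exact pvMinF_le_init _ _ _
    · rw [h2]; exact pvMinF_le_mem _ _ _ _ ((h x).mpr hx)
  · rcases pvMinF_cases target c l₁ with h1 | ⟨x, hx, h1⟩
    · rw [h1]; exact pvMinF_le_init _ _ _
    · rw [h1]; exact pvMinF_le_mem _ _ _ _ ((h x).mp hx)

lemma pvFoldlAdd (l : List Int) (a : Int) : l.foldl (· + ·) a = a + l.foldl (· + ·) 0 := by
  induction l generalizing a with
  | nil => simp
  | cons x xs ih =>
      simp only [List.foldl_cons]
      rw [ih (a + x), ih (0 + x)]
      ring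

-- the DP set contains exactly the sums reachable from S through pvProds mat
lemma pv_mem_dpSums (mat : List (List Int)) (S : List Int) (s : Int) :
    s ∈ mat.foldl
      (fun sums row => PySem.Set.ofList (sums.flatMap (fun s => row.map (fun x => s + x)))) S
    ↔ ∃ s0 ∈ S, ∃ p ∈ pvProds mat, s = s0 + p.foldl (· + ·) 0 := by
  induction mat generalizing S with
  | nil => simp [pvProds]
  | cons row rows ih =>
      simp only [List.foldl_cons]
      rw [ih]
      constructor
      · rintro ⟨s1, hs1, p, hp, rfl⟩
        rw [PySem.Set.mem_ofList] at hs1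
        rcases List.mem_flatMap.mp hs1 with ⟨s0, hs0, hs1'⟩
        rcases List.mem_map.mp hs1' with ⟨x, hx, rfl⟩
        refine ⟨s0, hs0, x :: p, ?_, ?_⟩
        · simp only [pvProds]
          exact List.mem_flatMap.mpr ⟨x, hx, List.mem_map.mpr ⟨p, hp, rfl⟩⟩
        · simp only [List.foldl_cons]
          rw [pvFoldlAdd p (0 + x)]
          ring
      · rintro ⟨s0, hs0, p, hp, rfl⟩
        simp only [pvProds] at hp
        rcases List.mem_flatMap.mp hp with ⟨x, hx, hp'⟩
        rcases List.mem_map.mp hp' with ⟨q, hq, rfl⟩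
        refine ⟨s0 + x, ?_, q, hq, ?_⟩
        · rw [PySem.Set.mem_ofList]
          exact List.mem_flatMap.mpr ⟨s0, hs0, List.mem_map.mpr ⟨x, hx, rfl⟩⟩
        · simp only [List.foldl_cons]
          rw [pvFoldlAdd q (0 + x)]
          ring

-- ===== VERDICT (by name: the statement is the Claim_ definition above) =====
theorem minimizeTheDifference_spec : Claim_equal_minimizeTheDifference := by
  intro mat target _
  show minimizeTheDifference mat target = minimizeTheDifference_alt mat target
  unfold minimizeTheDifference minimizeTheDifference_alt
  rw [pvLoopA_eq_minF]
  show pvMinF target 100000000 _ = pvMinF target 100000000 _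
  apply pvMinF_congr_mem
  intro x
  rw [pv_mem_dpSums]
  constructor
  · intro hx
    rcases List.mem_map.mp hx with ⟨p, hp, rfl⟩
    exact ⟨0, by simp [PySem.Set.ofList], p, hp, by ring⟩
  · rintro ⟨s0, hs0, p, hp, rfl⟩
    simp only [PySem.Set.ofList, PySem.Set.add, List.foldl] at hs0
    have : s0 = 0 := by simpa using hs0
    subst this
    exact List.mem_map.mpr ⟨p, hp, by simp⟩
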